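-- pv_equiv track=rewrite | github.com/motosw3600/Algorithm | Basic math2/Factorization_renew.py | first_prime
-- ===== SOURCE A (Python) =====
-- def first_prime(num):
--     result = 0
--     num = int(num ** 2) + 1
--     for i in range(2, num):
--         if num % i == 0:
--             result = i
--             break
--     return result
-- ===== SOURCE B (Python) =====
-- def first_prime(num):
--     m = num * num + 1
--     i = 2
--     while i * i <= m:
--         if m % i == 0:
--             return i
--         i += 1
--     return 0
-- ===== Notes on version B (the rewrite author's own statement) =====
-- stated objective: alternative
-- what changed: B trial-divides only up to sqrt(num^2+1) (returning 0 when no divisor's square fits, which implies primality), instead of A's scan of every candidate up to num^2+1.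
import Mathlib
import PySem

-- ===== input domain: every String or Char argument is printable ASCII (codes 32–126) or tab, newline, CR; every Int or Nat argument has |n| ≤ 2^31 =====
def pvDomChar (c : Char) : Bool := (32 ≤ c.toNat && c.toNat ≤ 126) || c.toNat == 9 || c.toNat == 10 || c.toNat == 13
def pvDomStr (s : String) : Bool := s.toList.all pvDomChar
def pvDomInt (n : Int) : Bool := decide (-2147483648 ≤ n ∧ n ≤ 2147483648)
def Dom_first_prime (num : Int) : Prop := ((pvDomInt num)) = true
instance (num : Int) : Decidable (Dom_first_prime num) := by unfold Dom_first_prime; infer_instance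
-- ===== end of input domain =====

-- B replaces A's scan of all candidates below num^2+1 by trial division up to its square root (objective: alternative).

-- ===== PORT A =====
-- A's `for i in range(2, num): if num % i == 0: result = i; break` as a while-style
-- recursion that stops at the first divisor (exactly the iterations Python performs).
def firstPrimeLoopA (m i : Int) : Int :=
  if i < m then
    if PySem.Int.mod m i == 0 then i else firstPrimeLoopA m (i + 1)
  else 0
termination_by (m - i).toNat
decreasing_by omega

def first_prime (num : Int) : Int :=
  firstPrimeLoopA (num ^ 2 + 1) 2

-- ===== PORT B =====
-- termination helper for B's loop (cited by its decreasing_by)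
lemma le_of_sq_le (i m : Int) (h : i * i ≤ m) : i ≤ m := by
  rcases (by omega : i ≤ 0 ∨ 0 < i) with hi | hi
  · nlinarith [mul_self_nonneg i]
  · nlinarith

-- B's `while i * i <= m` loop.
def firstPrimeLoopB (m i : Int) : Int :=
  if i * i ≤ m then
    if PySem.Int.mod m i == 0 then i else firstPrimeLoopB m (i + 1)
  else 0
termination_by (m + 1 - i).toNat
decreasing_by
  have h : i * i ≤ m := by assumption
  have hi : i ≤ m := le_of_sq_le i m h
  omega

def first_prime_alt (num : Int) : Int :=
  firstPrimeLoopB (num * num + 1) 2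

-- ===== PRECONDITION & SPEC =====
def Spec_first_prime (num : Int) (out : Int) : Prop := out = first_prime_alt num
instance (num : Int) (out : Int) : Decidable (Spec_first_prime num out) := by unfold Spec_first_prime; infer_instance

-- ===== CLAIM (what is proved, stated in full; the proofs are below) =====
def Claim_equal_first_prime : Prop := ∀ (num : Int), Dom_first_prime num → Spec_first_prime num (first_prime num)

-- ===== LEMMAS AND PROOFS =====

-- If no j in [i, m) divides m, A's loop returns 0.
lemma loopA_eq_zero (m : Int) : ∀ i, (∀ j, i ≤ j → j < m → ¬ j ∣ m) → firstPrimeLoopA m i = 0 := by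
  intro i
  induction i using (fun i => firstPrimeLoopA.induct m i) with
  | case1 i hlt hdvd =>
    intro h
    exact absurd ((PySem.Int.mod_eq_zero_iff_dvd m i).1 (by simpa using hdvd))
      (h i le_rfl hlt)
  | case2 i hlt hdvd ih =>
    intro h
    rw [firstPrimeLoopA, if_pos hlt, if_neg hdvd]
    exact ih (fun j hj => h j (by omega))
  | case3 i hge =>
    intro _
    rw [firstPrimeLoopA, if_neg hge]

-- Main invariant: starting at i ≥ 2 with no divisor of m in [2, i), the two loops agree.
lemma loop_eq (m : Int) :
    ∀ i, 2 ≤ i → (∀ j, 2 ≤ j → j < i → ¬ j ∣ m) → firstPrimeLoopA m i = firstPrimeLoopB m i := by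
  intro i
  induction i using (fun i => firstPrimeLoopB.induct m i) with
  | case1 i hsq hdvd =>
    intro h2 hinv
    have hlt : i < m := by nlinarith
    rw [firstPrimeLoopA, if_pos hlt, if_pos hdvd,
        firstPrimeLoopB, if_pos hsq, if_pos hdvd]
  | case2 i hsq hdvd ih =>
    intro h2 hinv
    have hlt : i < m := by nlinarith
    rw [firstPrimeLoopA, if_pos hlt, if_neg hdvd,
        firstPrimeLoopB, if_pos hsq, if_neg hdvd]
    refine ih (by omega) ?_
    intro j hj2 hji hdj
    rcases lt_or_eq_of_le (by omega : j ≤ i) with hlt' | rfl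
    · exact hinv j hj2 hlt' hdj
    · exact absurd ((PySem.Int.mod_eq_zero_iff_dvd m j).2 hdj) (by simpa using hdvd)
  | case3 i hsq =>
    intro h2 hinv
    rw [firstPrimeLoopB, if_neg hsq]
    -- i*i > m and no divisor below i ⇒ no divisor in [i, m) either (the cofactor would be < i).
    refine loopA_eq_zero m i ?_
    intro j hij hjm ⟨k, hk⟩
    rw [not_le] at hsq
    have hj2 : 2 ≤ j := by omega
    have hk1 : 1 ≤ k := by nlinarith
    have hkne : k ≠ 1 := by
      rintro rfl; omega
    have hki : k < i := by nlinarith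
    exact hinv k (by omega) hki ⟨j, by linarith [hk, mul_comm j k]⟩

-- ===== VERDICT (by name: the statement is the Claim_ definition above) =====
theorem first_prime_spec : Claim_equal_first_prime := by
  intro num _
  unfold Spec_first_prime first_prime first_prime_alt
  have : num ^ 2 + 1 = num * num + 1 := by ring
  rw [this]
  exact loop_eq (num * num + 1) 2 le_rfl (by intro j h1 h2; omega)
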